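-- pv_equiv track=rewrite | github.com/ayanalamMOON/LeetCodeProblemSolutions | Rgegular_Practice_Problems/Problem1/InPython.py | numWaysMemo
-- ===== SOURCE A (Python) =====
-- from typing import List
-- from functools import lru_cache
--
-- def numWaysMemo(words: List[str], target: str) -> int:
--     """
--     Memoized Recursion (Top-Down DP)
--     """
--     MOD = 1000000007
--     m = len(target)
--     n = len(words[0])
--
--     if m > n:
--         return 0
--
--     # Precompute frequencies
--     freq = [[0] * 26 for _ in range(n)]
--     for word in words:
--         for i, char in enumerate(word):
--             freq[i][ord(char) - ord('a')] += 1
--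
--     @lru_cache(maxsize=None)
--     def dfs(target_idx: int, word_pos: int) -> int:
--         # Base cases
--         if target_idx == m:
--             return 1
--         if word_pos == n:
--             return 0
--         if n - word_pos < m - target_idx:
--             return 0
--
--         # Skip current position
--         result = dfs(target_idx, word_pos + 1)
--
--         # Use current position
--         char_index = ord(target[target_idx]) - ord('a')
--         if freq[word_pos][char_index] > 0:
--             result = (result + dfs(target_idx + 1, word_pos + 1) * freq[word_pos][char_index]) % MOD
--
--         return result
--
--     return dfs(0, 0)
-- ===== SOURCE B (Python) =====
-- from typing import List
--
-- def numWaysMemo(words: List[str], target: str) -> int: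
--     """
--     Bottom-up iterative DP over a dp vector (dp[ti] = ways to form target[ti:]
--     from the remaining columns), replacing the memoized recursion.
--     """
--     MOD = 1000000007
--     m = len(target)
--     n = len(words[0])
--
--     if m > n:
--         return 0
--
--     freq = [[0] * 26 for _ in range(n)]
--     for word in words:
--         for i, ch in enumerate(word):
--             freq[i][ord(ch) - ord('a')] += 1
--
--     dp = [0] * m + [1]
--     for pos in reversed(range(n)):
--         for ti in range(m):
--             f = freq[pos][ord(target[ti]) - ord('a')]
--             if f > 0:
--                 dp[ti] = (dp[ti] + dp[ti + 1] * f) % MOD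
--     return dp[0]
-- ===== Notes on version B (the rewrite author's own statement) =====
-- stated objective: alternative
-- what changed: Replaced the lru_cache memoized top-down recursion dfs(target_idx, word_pos) by a bottom-up iterative DP that sweeps columns from right to left, updating in place a dp vector of length m+1 with dp[ti] = ways to form target[ti:] from the remaining columns; the freq precomputation and the m>n guard are unchanged.
-- outside the precondition, e.g. on numWaysMemo(['bb'], 'a!'): A returns 0, B raises IndexError
import Mathlib
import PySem

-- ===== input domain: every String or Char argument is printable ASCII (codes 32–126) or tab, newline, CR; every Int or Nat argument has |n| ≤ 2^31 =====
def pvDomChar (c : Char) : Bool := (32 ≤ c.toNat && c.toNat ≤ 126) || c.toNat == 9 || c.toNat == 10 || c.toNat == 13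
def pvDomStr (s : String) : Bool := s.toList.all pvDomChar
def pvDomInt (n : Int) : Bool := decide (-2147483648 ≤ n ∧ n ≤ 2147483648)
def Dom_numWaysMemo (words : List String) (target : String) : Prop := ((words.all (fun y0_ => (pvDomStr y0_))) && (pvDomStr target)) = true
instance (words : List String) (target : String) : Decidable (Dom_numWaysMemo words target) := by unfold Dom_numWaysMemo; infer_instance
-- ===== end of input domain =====

-- B replaces A's memoized top-down recursion by a bottom-up in-place DP vector (same freq
-- precomputation, which both Pythons share verbatim); equivalence is about the return value.

-- ===== PORT A =====
-- ord(c) - ord('a')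
def pvCidx (c : Char) : Int := (c.toNat : Int) - 97

-- row[k] += 1 with Python's negative-index wraparound (exact for -len ≤ k < len; Pre_ excludes the rest)
def pvBumpRow (row : List Int) (k : Int) : List Int :=
  let j : Int := if k < 0 then k + row.length else k
  row.set j.toNat ((PySem.List.pyGet? row k).getD 0 + 1)

-- freq[i][k] += 1
def pvBump (rows : List (List Int)) (i : Nat) (k : Int) : List (List Int) :=
  rows.set i (pvBumpRow (rows.getD i []) k)

-- the freq table both Pythons build with the same two loops
def pvFreq (words : List String) (n : Nat) : List (List Int) :=
  words.foldl
    (fun rows w =>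
      (PySem.List.enumerate w.toList 0).foldl
        (fun rs p => pvBump rs p.1.toNat (pvCidx p.2)) rows)
    (List.replicate n (List.replicate 26 0))

-- freq[i][k] (negative k wraps, as in Python; out-of-range is excluded by Pre_)
def pvAt2 (rows : List (List Int)) (i : Nat) (k : Int) : Int :=
  (PySem.List.pyGet? (rows.getD i []) k).getD 0

-- A's dfs (the lru_cache memoisation does not change the value of the pure function)
def dfsA (m n : Nat) (tgt : List Char) (freq : List (List Int)) (ti wp : Nat) : Int :=
  if ti = m then 1
  else if n ≤ wp then 0
  else if n - wp < m - ti then 0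
  else
    let r := dfsA m n tgt freq ti (wp + 1)
    let f := pvAt2 freq wp (pvCidx (tgt.getD ti ' '))
    if 0 < f then PySem.Int.mod (r + dfsA m n tgt freq (ti + 1) (wp + 1) * f) 1000000007
    else r
termination_by n - wp
decreasing_by all_goals omega

def numWaysMemo (words : List String) (target : String) : Int :=
  let m := target.toList.length
  let n := ((words.headD "").toList.length)
  if m > n then 0
  else dfsA m n target.toList (pvFreq words n) 0 0

-- ===== PORT B =====
def numWaysMemo_alt (words : List String) (target : String) : Int :=
  let m := target.toList.length
  let n := ((words.headD "").toList.length)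
  if m > n then 0
  else
    let freq := pvFreq words n
    let dp0 : List Int := List.replicate m (0 : Int) ++ [1]
    let dp := ((List.range n).reverse).foldl
      (fun dp pos =>
        (List.range m).foldl
          (fun dp ti =>
            let f := pvAt2 freq pos (pvCidx (target.toList.getD ti ' '))
            if 0 < f then
              dp.set ti (PySem.Int.mod (dp.getD ti 0 + dp.getD (ti + 1) 0 * f) 1000000007)
            else dp)
          dp)
      dp0
    dp.getD 0 0

-- ===== PRECONDITION & SPEC =====
-- Pre_ excludes inputs where A raises IndexError (empty words, a word longer than words[0],
-- a character whose index ord(c)-97 falls outside [-26,25] and is actually indexed), and the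
-- inputs where a target character with such an out-of-range index is never reached by A's lazy
-- recursion (A returns 0 there) while B's eager DP loop indexes it and raises.
def pvOkChar (c : Char) : Bool := decide (71 ≤ c.toNat) && decide (c.toNat ≤ 122)

def Pre_numWaysMemo (words : List String) (target : String) : Prop :=
  words ≠ [] ∧
  (target.toList.length ≤ (words.headD "").toList.length →
    ((words.all (fun w =>
        decide (w.toList.length ≤ (words.headD "").toList.length) && w.toList.all pvOkChar)) &&
      target.toList.all pvOkChar) = true)

instance (words : List String) (target : String) : Decidable (Pre_numWaysMemo words target) := by
  unfold Pre_numWaysMemo; infer_instance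

def pvWitness_numWaysMemo : List String × String := (["acca", "bbbb", "caca"], "aba")

def Spec_numWaysMemo (words : List String) (target : String) (out : Int) : Prop := out = numWaysMemo_alt words target
instance (words : List String) (target : String) (out : Int) : Decidable (Spec_numWaysMemo words target out) := by unfold Spec_numWaysMemo; infer_instance

-- ===== CLAIM (what is proved, stated in full; the proofs are below) =====
def Claim_equal_numWaysMemo : Prop := ∀ (words : List String) (target : String), Dom_numWaysMemo words target → Pre_numWaysMemo words target → Spec_numWaysMemo words target (numWaysMemo words target)

-- ===== LEMMAS AND PROOFS =====

-- proof-side reference: A's dfs with the (value-preserving) pruning guard removed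
def dpB (m n : Nat) (tgt : List Char) (freq : List (List Int)) (ti wp : Nat) : Int :=
  if ti = m then 1
  else if n ≤ wp then 0
  else
    let r := dpB m n tgt freq ti (wp + 1)
    let f := pvAt2 freq wp (pvCidx (tgt.getD ti ' '))
    if 0 < f then PySem.Int.mod (r + dpB m n tgt freq (ti + 1) (wp + 1) * f) 1000000007
    else r
termination_by n - wp
decreasing_by all_goals omega

lemma dpB_pruned (m n : Nat) (tgt : List Char) (freq : List (List Int)) :
    ∀ k ti wp, n - wp = k → ti < m → wp ≤ n → n - wp < m - ti →
      dpB m n tgt freq ti wp = 0 := by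
  intro k
  induction k with
  | zero =>
    intro ti wp h0 hti hwp hlt
    rw [dpB, if_neg (by omega : ¬ ti = m), if_pos (by omega : n ≤ wp)]
  | succ k ih =>
    intro ti wp h0 hti hwp hlt
    have hm2 : ti + 1 < m := by omega
    rw [dpB, if_neg (by omega : ¬ ti = m), if_neg (by omega : ¬ n ≤ wp)]
    have h1 := ih ti (wp + 1) (by omega) hti (by omega) (by omega)
    have h2 := ih (ti + 1) (wp + 1) (by omega) hm2 (by omega) (by omega)
    simp only [h1, h2]
    split <;> simp [PySem.Int.mod]

lemma dfsA_eq_dpB (m n : Nat) (tgt : List Char) (freq : List (List Int)) :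
    ∀ k ti wp, n - wp = k → ti ≤ m → wp ≤ n →
      dfsA m n tgt freq ti wp = dpB m n tgt freq ti wp := by
  intro k
  induction k with
  | zero =>
    intro ti wp h0 hti hwp
    rw [dfsA, dpB]
    by_cases hm : ti = m
    · simp [hm]
    · rw [if_neg hm, if_neg hm, if_pos (by omega : n ≤ wp), if_pos (by omega : n ≤ wp)]
  | succ k ih =>
    intro ti wp h0 hti hwp
    by_cases hm : ti = m
    · rw [dfsA, dpB]; simp [hm]
    · by_cases hpr : n - wp < m - ti
      · rw [dfsA, if_neg hm, if_neg (by omega : ¬ n ≤ wp), if_pos hpr]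
        exact (dpB_pruned m n tgt freq (k + 1) ti wp (by omega) (by omega) hwp hpr).symm
      · rw [dfsA, dpB, if_neg hm, if_neg hm, if_neg (by omega : ¬ n ≤ wp),
            if_neg (by omega : ¬ n ≤ wp), if_neg hpr]
        have h1 := ih ti (wp + 1) (by omega) hti (by omega)
        have h2 := ih (ti + 1) (wp + 1) (by omega) (by omega) (by omega)
        simp only [h1, h2]

lemma getD_set_int (xs : List Int) (i j : Nat) (v : Int) (hi : i < xs.length) :
    (xs.set i v).getD j 0 = if i = j then v else xs.getD j 0 := by
  simp only [List.getD_eq_getElem?_getD, List.getElem?_set, hi, if_true]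
  split
  · simp
  · rfl

-- the combination B applies at one cell
def pvComb (tgt : List Char) (freq : List (List Int)) (g : Nat → Int) (pos ti : Nat) : Int :=
  let f := pvAt2 freq pos (pvCidx (tgt.getD ti ' '))
  if 0 < f then PySem.Int.mod (g ti + g (ti + 1) * f) 1000000007 else g ti

lemma inner_fold (m : Nat) (tgt : List Char) (freq : List (List Int)) (pos : Nat) (g : Nat → Int) :
    ∀ cnt s (dp : List Int), dp.length = m + 1 → s + cnt ≤ m →
      (∀ j, j < m + 1 → dp.getD j 0 = if j < s then pvComb tgt freq g pos j else g j) →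
      (let r := (List.range' s cnt).foldl
          (fun dp ti =>
            let f := pvAt2 freq pos (pvCidx (tgt.getD ti ' '))
            if 0 < f then
              dp.set ti (PySem.Int.mod (dp.getD ti 0 + dp.getD (ti + 1) 0 * f) 1000000007)
            else dp) dp
       r.length = m + 1 ∧ ∀ j, j < m + 1 → r.getD j 0 = if j < s + cnt then pvComb tgt freq g pos j else g j) := by
  intro cnt
  induction cnt with
  | zero =>
    intro s dp hlen hle hdp
    simp only [List.range'_zero, List.foldl_nil]
    exact ⟨hlen, fun j hj => by simpa using hdp j hj⟩
  | succ cnt ih =>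
    intro s dp hlen hle hdp
    rw [List.range'_succ, List.foldl_cons]
    have hs : dp.getD s 0 = g s := by
      have h := hdp s (by omega); rwa [if_neg (by omega)] at h
    have hs1 : dp.getD (s + 1) 0 = g (s + 1) := by
      have h := hdp (s + 1) (by omega); rwa [if_neg (by omega)] at h
    have harith : s + 1 + cnt = s + (cnt + 1) := by omega
    by_cases hf : 0 < pvAt2 freq pos (pvCidx (tgt.getD s ' '))
    · simp only [hf, if_true]
      have hres := ih (s + 1)
        (dp.set s (PySem.Int.mod (dp.getD s 0 + dp.getD (s + 1) 0 * pvAt2 freq pos (pvCidx (tgt.getD s ' '))) 1000000007))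
        (by simpa using hlen) (by omega)
        (fun j hj => by
          rw [getD_set_int _ _ _ _ (by omega)]
          by_cases hjs : s = j
          · subst hjs
            rw [if_pos rfl, if_pos (by omega), pvComb, hs, hs1]
            simp only [hf, if_true]
          · rw [if_neg hjs]
            have h := hdp j hj
            by_cases hlt : j < s
            · rw [if_pos (by omega), h, if_pos hlt]
            · rw [if_neg (by omega), h, if_neg hlt])
      rw [harith] at hres
      exact hres
    · simp only [hf, if_false]
      have hres := ih (s + 1) dp hlen (by omega)
        (fun j hj => by
          have h := hdp j hj
          by_cases hjs : j = s
          · subst hjs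
            rw [if_pos (by omega), pvComb, h, if_neg (by omega)]
            simp only [hf, if_false]
          · by_cases hlt : j < s
            · rw [if_pos (by omega), h, if_pos hlt]
            · rw [if_neg (by omega), h, if_neg (by omega)])
      rw [harith] at hres
      exact hres

lemma outer_fold (m n : Nat) (tgt : List Char) (freq : List (List Int)) :
    ∀ k, k ≤ n → ∀ dp : List Int, dp.length = m + 1 →
      (∀ j, j < m + 1 → dp.getD j 0 = dpB m n tgt freq j k) →
      ∀ j, j < m + 1 →
        (((List.range k).reverse).foldl
          (fun dp pos =>
            (List.range m).foldl
              (fun dp ti =>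
                let f := pvAt2 freq pos (pvCidx (tgt.getD ti ' '))
                if 0 < f then
                  dp.set ti (PySem.Int.mod (dp.getD ti 0 + dp.getD (ti + 1) 0 * f) 1000000007)
                else dp) dp) dp).getD j 0 = dpB m n tgt freq j 0 := by
  intro k
  induction k with
  | zero =>
    intro hk dp hlen hdp j hj
    simpa using hdp j hj
  | succ k ih =>
    intro hk dp hlen hdp j hj
    have hrev : (List.range (k + 1)).reverse = k :: (List.range k).reverse := by
      rw [List.range_succ]; simp
    rw [hrev, List.foldl_cons]
    have hinner := inner_fold m tgt freq k (fun j => dpB m n tgt freq j (k + 1)) m 0 dp hlen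
      (by omega) (fun j hj => by simpa using hdp j hj)
    rw [← List.range_eq_range'] at hinner
    obtain ⟨hlen1, hvals⟩ := hinner
    refine ih (by omega) _ hlen1 (fun j hj => ?_) j hj
    have hv := hvals j hj
    by_cases hjm : j < m
    · rw [if_pos (by omega)] at hv
      rw [hv]
      conv_rhs => rw [dpB]
      rw [if_neg (by omega : ¬ j = m), if_neg (by omega : ¬ n ≤ k)]
      rfl
    · rw [if_neg (by omega)] at hv
      have hjm' : j = m := by omega
      rw [hv, hjm']
      show dpB m n tgt freq m (k + 1) = dpB m n tgt freq m k
      conv_lhs => rw [dpB]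
      conv_rhs => rw [dpB]
      simp

-- ===== VERDICT (by name: the statement is the Claim_ definition above) =====
theorem numWaysMemo_spec : Claim_equal_numWaysMemo := by
  intro words target _ _
  unfold Spec_numWaysMemo numWaysMemo numWaysMemo_alt
  simp only []
  by_cases hmn : target.toList.length > (words.headD "").toList.length
  · rw [if_pos hmn, if_pos hmn]
  · rw [if_neg hmn, if_neg hmn]
    set m := target.toList.length with hm
    set n := (words.headD "").toList.length with hn
    set freq := pvFreq words n with hfreq
    have hdp0 : ∀ j, j < m + 1 →
        (List.replicate m (0 : Int) ++ [1]).getD j 0 = dpB m n target.toList freq j n := by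
      intro j hj
      by_cases hjm : j < m
      · rw [dpB, if_neg (by omega : ¬ j = m), if_pos (le_refl n)]
        simp [List.getD_eq_getElem?_getD, List.getElem?_append_left, hjm]
      · have : j = m := by omega
        subst this
        rw [dpB, if_pos rfl]
        simp [List.getD_eq_getElem?_getD]
    have hout := outer_fold m n target.toList freq n (le_refl n)
      (List.replicate m (0 : Int) ++ [1]) (by simp) hdp0 0 (by omega)
    rw [hout]
    exact dfsA_eq_dpB m n target.toList freq n 0 0 rfl (by omega) (by omega)
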